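-- pv_equiv track=rewrite | github.com/winterash2/TIL | 2021-07-03-부캠-2차-코테/2.py | solution
-- ===== SOURCE A (Python) =====
-- def boost_bin2hex(octStr):
--     # 8비트 길이 2진수 문자열을 입력으로 16진수 문자열(0x 뒤는 전부 대문자로)로 바꿔서 리턴
--     hexTohexStrDict = {0: '0', 1:'1', 2:'2', 3:'3', 4:'4', 5:'5', 6:'6', 7:'7', 8:'8', 9:'9',10:'A', 11:'B', 12:'C', 13:'D', 14:'E', 15:'F'}
--     hexStr = '0x'
--     # 앞부분
--     b8, b4, b2, b1 = int(octStr[0]), int(octStr[1]), int(octStr[2]), int(octStr[3])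
--     hexStr += hexTohexStrDict[8 * b8 + 4 * b4 + 2 * b2 + b1]
--     # 뒷부분
--     b8, b4, b2, b1 = int(octStr[4]), int(octStr[5]), int(octStr[6]), int(octStr[7])
--     hexStr += hexTohexStrDict[8 * b8 + 4 * b4 + 2 * b2 + b1]
--     return hexStr
--
-- def boost_dec2hex(dec):
--     # 256 미만 10진수를 입력으로 16진수 문자열로 바꿔서 리턴
--     hexTohexStrDict = {0: '0', 1:'1', 2:'2', 3:'3', 4:'4', 5:'5', 6:'6', 7:'7', 8:'8', 9:'9',10:'A', 11:'B', 12:'C', 13:'D', 14:'E', 15:'F'}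
--     hexStr = ''
--     #앞부분
--     hexStr += hexTohexStrDict[int(dec) // 16]
--     #뒷부분
--     hexStr += hexTohexStrDict[int(dec) % 16]
--     return hexStr
--
-- def solution(param0):
--     answer = ''
--     regToBitDict = {'A': '111', 'B': '000', 'C': '001', 'D': '010', 'E': '011', 'H': '100', 'L': '101'}
--
--     inst = ''
--     for idx in range(len(param0)):
--         if param0[idx] != ' ':
--             inst += param0[idx]
--         else:
--             param0 = param0[idx+1:]
--             break
--     # 없는 명령어인 경우, 혹은 공백이 잘못된 경우
--     if inst != "LD" and inst != "LN":
--         return "ERROR"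
--
--     param1 = ''
--     param2 = ''
--     for idx in range(len(param0)):
--         if param0[idx] != ',':
--             param1 += param0[idx]
--         else:
--             param2 = param0[idx+1:]
--             break
--     param1, param2 = param1.strip(), param2.strip()
--
--     if inst == "LD":
--         # 레지스터 문자 값이 7종류가 아닌 경우, 혹은 콤마가 잘못된 경우
--         if param1 not in regToBitDict or param2 not in regToBitDict:
--             return "ERROR"
--         # 의미가 없는 경우
--         if param1 == param2:
--             return "NOOP"
--         answer += '01'
--         answer += regToBitDict[param1]
--         answer += regToBitDict[param2]
--         answer = boost_bin2hex(answer)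
--     elif inst == "LN":
--         # 레지스터 문자 값이 7종류가 아닌 경우, 혹은 콤마가 잘못된 경우
--         if param1 not in regToBitDict:
--             return "ERROR"
--         answer += '00'
--         answer += regToBitDict[param1]
--         answer += '110'
--         answer = boost_bin2hex(answer)
--         answer += boost_dec2hex(param2)
--
--     return answer
-- ===== SOURCE B (Python) =====
-- def solution(param0):
--     regBits = {'A': 7, 'B': 0, 'C': 1, 'D': 2, 'E': 3, 'H': 4, 'L': 5}
--     inst, sep, rest = param0.partition(' ')
--     if sep == '' or (inst != 'LD' and inst != 'LN'):
--         return 'ERROR'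
--     p1, _, p2 = rest.partition(',')
--     p1, p2 = p1.strip(), p2.strip()
--     if inst == 'LD':
--         if p1 not in regBits or p2 not in regBits:
--             return 'ERROR'
--         if p1 == p2:
--             return 'NOOP'
--         return '0x%02X' % (0b01000000 | (regBits[p1] << 3) | regBits[p2])
--     else:
--         if p1 not in regBits:
--             return 'ERROR'
--         n = int(p2)
--         return '0x%02X%02X' % ((regBits[p1] << 3) | 0b110, n)
-- ===== Notes on version B (the rewrite author's own statement) =====
-- stated objective: simpler
-- what changed: B parses with str.partition instead of A's index loops that rebuild the string character by character, and encodes the instruction by integer bit arithmetic with two-digit hex formatting instead of concatenating 3-bit strings and translating nibbles through a dictionary via boost_bin2hex.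
import Mathlib
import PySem

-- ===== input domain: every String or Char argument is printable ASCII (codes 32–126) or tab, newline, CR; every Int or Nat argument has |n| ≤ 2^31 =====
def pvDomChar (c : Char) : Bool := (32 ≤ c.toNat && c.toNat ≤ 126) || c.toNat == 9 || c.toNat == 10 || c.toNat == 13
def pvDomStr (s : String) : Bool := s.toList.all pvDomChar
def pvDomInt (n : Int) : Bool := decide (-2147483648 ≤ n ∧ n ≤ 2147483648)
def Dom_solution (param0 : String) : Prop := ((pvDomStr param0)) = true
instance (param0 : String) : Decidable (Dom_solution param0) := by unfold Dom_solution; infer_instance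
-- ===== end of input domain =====

-- B replaces A's index-loop scans by takeWhile/dropWhile partitioning and the binary-string
-- building + nibble dictionary by integer bit arithmetic with direct hex formatting (objective: simpler).

-- ===== PORT A =====
-- hexTohexStrDict of boost_bin2hex/boost_dec2hex
def hexDictA : PySem.Dict Int (List Char) :=
  PySem.Dict.ofList [(0, ['0']), (1, ['1']), (2, ['2']), (3, ['3']), (4, ['4']), (5, ['5']),
    (6, ['6']), (7, ['7']), (8, ['8']), (9, ['9']), (10, ['A']), (11, ['B']), (12, ['C']),
    (13, ['D']), (14, ['E']), (15, ['F'])]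

-- regToBitDict
def regDictA : PySem.Dict (List Char) (List Char) :=
  PySem.Dict.ofList [(['A'], ['1','1','1']), (['B'], ['0','0','0']), (['C'], ['0','0','1']),
    (['D'], ['0','1','0']), (['E'], ['0','1','1']), (['H'], ['1','0','0']), (['L'], ['1','0','1'])]

-- boost_bin2hex; none = the KeyError/IndexError/ValueError Python would raise (unreachable from solution's call sites)
def bin2hexA (octStr : List Char) : Option (List Char) := do
  let b8 ← (PySem.List.pyGet? octStr 0).bind (fun c => PySem.Int.ofChars? [c])
  let b4 ← (PySem.List.pyGet? octStr 1).bind (fun c => PySem.Int.ofChars? [c])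
  let b2 ← (PySem.List.pyGet? octStr 2).bind (fun c => PySem.Int.ofChars? [c])
  let b1 ← (PySem.List.pyGet? octStr 3).bind (fun c => PySem.Int.ofChars? [c])
  let h1 ← hexDictA.get? (8 * b8 + 4 * b4 + 2 * b2 + b1)
  let c8 ← (PySem.List.pyGet? octStr 4).bind (fun c => PySem.Int.ofChars? [c])
  let c4 ← (PySem.List.pyGet? octStr 5).bind (fun c => PySem.Int.ofChars? [c])
  let c2 ← (PySem.List.pyGet? octStr 6).bind (fun c => PySem.Int.ofChars? [c])
  let c1 ← (PySem.List.pyGet? octStr 7).bind (fun c => PySem.Int.ofChars? [c])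
  let h2 ← hexDictA.get? (8 * c8 + 4 * c4 + 2 * c2 + c1)
  return ['0','x'] ++ h1 ++ h2

-- boost_dec2hex; none = the ValueError of int(dec) or the KeyError of the dict (dec outside [0,256))
def dec2hexA (dec : List Char) : Option (List Char) := do
  let n1 ← PySem.Int.ofChars? dec
  let h1 ← hexDictA.get? (PySem.Int.floordiv n1 16)
  let n2 ← PySem.Int.ofChars? dec
  let h2 ← hexDictA.get? (PySem.Int.mod n2 16)
  return h1 ++ h2

-- A's scan loops: chars before the first sep, and (on break) the rest after it; none = loop ran out
def scanA (sep : Char) : List Char → Option (List Char × List Char)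
  | [] => none
  | c :: rest =>
      if c ≠ sep then (scanA sep rest).map (fun p => (c :: p.1, p.2))
      else some ([], rest)

-- LD branch of A
def ldResultA (p1 p2 : List Char) : List Char :=
  match regDictA.get? p1, regDictA.get? p2 with
  | some b1, some b2 =>
      if p1 = p2 then ['N','O','O','P']
      else (bin2hexA (['0','1'] ++ b1 ++ b2)).getD []
  | _, _ => ['E','R','R','O','R']

-- LN branch of A; [] stands for the exception A raises there (excluded by Pre_)
def lnResultA (p1 p2 : List Char) : List Char :=
  match regDictA.get? p1 with
  | none => ['E','R','R','O','R']
  | some b1 =>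
      match bin2hexA (['0','0'] ++ b1 ++ ['1','1','0']), dec2hexA p2 with
      | some h, some d => h ++ d
      | _, _ => []

def solutionCore (cs : List Char) : List Char :=
  let (inst, cs1) := match scanA ' ' cs with
    | none => (cs, cs)
    | some p => p
  if inst ≠ ['L','D'] ∧ inst ≠ ['L','N'] then ['E','R','R','O','R']
  else
    let (q1, q2) := match scanA ',' cs1 with
      | none => (cs1, ([] : List Char))
      | some p => p
    let p1 := PySem.Chars.strip q1
    let p2 := PySem.Chars.strip q2
    if inst = ['L','D'] then ldResultA p1 p2
    else if inst = ['L','N'] then lnResultA p1 p2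
    else []

def solution (param0 : String) : String := String.ofList (solutionCore param0.toList)

-- ===== PORT B =====
def regBitsB : PySem.Dict (List Char) Int :=
  PySem.Dict.ofList [(['A'], 7), (['B'], 0), (['C'], 1), (['D'], 2), (['E'], 3), (['H'], 4), (['L'], 5)]

def hexDigitB (k : Int) : Char :=
  (PySem.List.pyGet? ['0','1','2','3','4','5','6','7','8','9','A','B','C','D','E','F'] k).getD '0'

-- '%02X' % v — exact for 0 ≤ v < 256, the only values B formats on inputs admitted by Pre_
def fmt02X (v : Int) : List Char :=
  [hexDigitB (PySem.Int.floordiv v 16), hexDigitB (PySem.Int.mod v 16)]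

-- str.partition(sep): (prefix, sep found?, suffix)
def partitionB (sep : Char) (cs : List Char) : List Char × Bool × List Char :=
  let pre := cs.takeWhile (· ≠ sep)
  let post := cs.dropWhile (· ≠ sep)
  (pre, !post.isEmpty, post.tail)

def ldResultB (p1 p2 : List Char) : List Char :=
  match regBitsB.get? p1, regBitsB.get? p2 with
  | some r1, some r2 =>
      if p1 = p2 then ['N','O','O','P']
      else ['0','x'] ++ fmt02X (PySem.Int.bor 64 (PySem.Int.bor (r1 <<< 3) r2))
  | _, _ => ['E','R','R','O','R']

-- [] stands for the ValueError int(p2) raises in B too (excluded by Pre_)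
def lnResultB (p1 p2 : List Char) : List Char :=
  match regBitsB.get? p1 with
  | none => ['E','R','R','O','R']
  | some r1 =>
      match PySem.Int.ofChars? p2 with
      | none => []
      | some n => ['0','x'] ++ fmt02X (PySem.Int.bor (r1 <<< 3) 6) ++ fmt02X n

def solutionAltCore (cs : List Char) : List Char :=
  let (inst, found, rest) := partitionB ' ' cs
  if found = false ∨ (inst ≠ ['L','D'] ∧ inst ≠ ['L','N']) then ['E','R','R','O','R']
  else
    let (q1, _, q2) := partitionB ',' rest
    let p1 := PySem.Chars.strip q1
    let p2 := PySem.Chars.strip q2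
    if inst = ['L','D'] then ldResultB p1 p2 else lnResultB p1 p2

def solution_alt (param0 : String) : String := String.ofList (solutionAltCore param0.toList)

-- ===== PRECONDITION & SPEC =====
-- Pre_ excludes exactly the inputs on which A raises: a well-formed "LN <reg>,<op>" whose operand
-- is not an int literal (ValueError) or denotes an int outside [0, 256) (KeyError in boost_dec2hex).
def lnOperandPre (cs : List Char) : Option (List Char) :=
  if (' ' ∈ cs) ∧ cs.takeWhile (· ≠ ' ') = ['L','N'] then
    let rest := (cs.dropWhile (· ≠ ' ')).tail
    let p1 := PySem.Chars.strip (rest.takeWhile (· ≠ ','))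
    if p1 = ['A'] ∨ p1 = ['B'] ∨ p1 = ['C'] ∨ p1 = ['D'] ∨ p1 = ['E'] ∨ p1 = ['H'] ∨ p1 = ['L'] then
      some (PySem.Chars.strip ((rest.dropWhile (· ≠ ',')).tail))
    else none
  else none

def Pre_solution (param0 : String) : Prop :=
  ((lnOperandPre param0.toList).all fun p2 =>
    (PySem.Int.ofChars? p2).any fun n => decide (0 ≤ n ∧ n < 256)) = true

instance (param0 : String) : Decidable (Pre_solution param0) := by unfold Pre_solution; infer_instance

def pvWitness_solution : String := "LN A,12"

def Spec_solution (param0 : String) (out : String) : Prop := out = solution_alt param0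
instance (param0 : String) (out : String) : Decidable (Spec_solution param0 out) := by unfold Spec_solution; infer_instance

-- ===== CLAIM (what is proved, stated in full; the proofs are below) =====
def Claim_equal_solution : Prop := ∀ (param0 : String), Dom_solution param0 → Pre_solution param0 → Spec_solution param0 (solution param0)

-- ===== LEMMAS AND PROOFS =====

theorem scanA_of_mem {sep : Char} {cs : List Char} (h : sep ∈ cs) :
    scanA sep cs = some (cs.takeWhile (· ≠ sep), (cs.dropWhile (· ≠ sep)).tail) := by
  induction cs with
  | nil => cases h
  | cons c rest ih =>
      by_cases hc : c = sep
      · subst hc; simp [scanA]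
      · have hm : sep ∈ rest := by
          rcases List.mem_cons.mp h with h' | h'
          · exact absurd h'.symm hc
          · exact h'
        simp [scanA, hc, ih hm]

theorem scanA_of_not_mem {sep : Char} {cs : List Char} (h : sep ∉ cs) :
    scanA sep cs = none := by
  induction cs with
  | nil => rfl
  | cons c rest ih =>
      have hc : c ≠ sep := fun hc => h (hc ▸ List.mem_cons_self)
      simp [scanA, hc, ih (fun hm => h (List.mem_cons_of_mem _ hm))]

theorem regDictA_eq_mk : regDictA = PySem.Dict.mk [(['A'], ['1','1','1']), (['B'], ['0','0','0']),
    (['C'], ['0','0','1']), (['D'], ['0','1','0']), (['E'], ['0','1','1']), (['H'], ['1','0','0']),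
    (['L'], ['1','0','1'])] := by decide

theorem regBitsB_eq_mk : regBitsB = PySem.Dict.mk [(['A'], 7), (['B'], 0), (['C'], 1), (['D'], 2),
    (['E'], 3), (['H'], 4), (['L'], 5)] := by decide

theorem reg_cases (p : List Char) :
    p = ['A'] ∨ p = ['B'] ∨ p = ['C'] ∨ p = ['D'] ∨ p = ['E'] ∨ p = ['H'] ∨ p = ['L'] ∨
      (regDictA.get? p = none ∧ regBitsB.get? p = none) := by
  by_cases h1 : p = ['A']; · exact Or.inl h1
  by_cases h2 : p = ['B']; · exact Or.inr (Or.inl h2)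
  by_cases h3 : p = ['C']; · exact Or.inr (Or.inr (Or.inl h3))
  by_cases h4 : p = ['D']; · exact Or.inr (Or.inr (Or.inr (Or.inl h4)))
  by_cases h5 : p = ['E']; · exact Or.inr (Or.inr (Or.inr (Or.inr (Or.inl h5))))
  by_cases h6 : p = ['H']; · exact Or.inr (Or.inr (Or.inr (Or.inr (Or.inr (Or.inl h6)))))
  by_cases h7 : p = ['L']; · exact Or.inr (Or.inr (Or.inr (Or.inr (Or.inr (Or.inr (Or.inl h7))))))
  refine Or.inr (Or.inr (Or.inr (Or.inr (Or.inr (Or.inr (Or.inr ⟨?_, ?_⟩))))))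
  · rw [regDictA_eq_mk]
    simp [PySem.Dict.get?]
    exact ⟨fun h => h1 h.symm, fun h => h2 h.symm, fun h => h3 h.symm, fun h => h4 h.symm,
      fun h => h5 h.symm, fun h => h6 h.symm, fun h => h7 h.symm⟩
  · rw [regBitsB_eq_mk]
    simp [PySem.Dict.get?]
    exact ⟨fun h => h1 h.symm, fun h => h2 h.symm, fun h => h3 h.symm, fun h => h4 h.symm,
      fun h => h5 h.symm, fun h => h6 h.symm, fun h => h7 h.symm⟩

theorem ld_eq (p1 p2 : List Char) : ldResultA p1 p2 = ldResultB p1 p2 := by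
  rcases reg_cases p1 with h1|h1|h1|h1|h1|h1|h1|⟨ha1, hb1⟩ <;>
    rcases reg_cases p2 with h2|h2|h2|h2|h2|h2|h2|⟨ha2, hb2⟩ <;>
      first
        | (subst h1 h2; decide)
        | (simp [ldResultA, ldResultB, *])

theorem hexDictA_get (k : Int) (h0 : 0 ≤ k) (h16 : k < 16) :
    hexDictA.get? k = some [hexDigitB k] := by
  interval_cases k <;> decide

theorem dec2hex_eq (p2 : List Char) (n : Int) (ho : PySem.Int.ofChars? p2 = some n)
    (h0 : 0 ≤ n) (h256 : n < 256) : dec2hexA p2 = some (fmt02X n) := by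
  have g1 : hexDictA.get? (n / 16) = some [hexDigitB (n / 16)] := by
    apply hexDictA_get <;> omega
  have g2 : hexDictA.get? (n % 16) = some [hexDigitB (n % 16)] := by
    apply hexDictA_get <;> omega
  simp [dec2hexA, ho, fmt02X, g1, g2]

theorem ln_key (p1 p2 : List Char) (n : Int)
    (hA : (regDictA.get? p1).isSome) (hB : (regBitsB.get? p1).isSome)
    (hbin : bin2hexA (['0','0'] ++ (regDictA.get? p1).getD [] ++ ['1','1','0']) =
      some (['0','x'] ++ fmt02X (PySem.Int.bor (((regBitsB.get? p1).getD 0) <<< 3) 6)))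
    (ho : PySem.Int.ofChars? p2 = some n) (h0 : 0 ≤ n) (h256 : n < 256) :
    lnResultA p1 p2 = lnResultB p1 p2 := by
  rcases Option.isSome_iff_exists.mp hA with ⟨b1, hA'⟩
  rcases Option.isSome_iff_exists.mp hB with ⟨r1, hB'⟩
  rw [hA', hB'] at hbin
  simp only [Option.getD_some, List.cons_append, List.nil_append] at hbin
  unfold lnResultA lnResultB
  rw [hA', hB']
  simp [hbin, ho, dec2hex_eq p2 n ho h0 h256]

theorem ln_eq (p1 p2 : List Char)
    (hpre : (regBitsB.get? p1).isSome →
      ((PySem.Int.ofChars? p2).any fun n => decide (0 ≤ n ∧ n < 256)) = true) :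
    lnResultA p1 p2 = lnResultB p1 p2 := by
  rcases reg_cases p1 with h|h|h|h|h|h|h|⟨ha, hb⟩
  all_goals first
    | (simp [lnResultA, lnResultB, ha, hb])
    | (subst h
       have hp := hpre (by decide)
       rcases ho : PySem.Int.ofChars? p2 with _ | n
       · rw [ho] at hp; simp at hp
       · rw [ho] at hp; simp at hp
         exact ln_key _ p2 n (by decide) (by decide) (by decide) ho hp.1 hp.2)

theorem core_eq (cs : List Char)
    (hpre : ((lnOperandPre cs).all fun p2 =>
      (PySem.Int.ofChars? p2).any fun n => decide (0 ≤ n ∧ n < 256)) = true) :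
    solutionCore cs = solutionAltCore cs := by
  by_cases hsp : ' ' ∈ cs
  · have hne : cs.dropWhile (· ≠ ' ') ≠ [] := by
      rw [Ne, List.dropWhile_eq_nil_iff]
      intro h
      have := h ' ' hsp
      simp at this
    unfold solutionCore solutionAltCore partitionB
    rw [scanA_of_mem hsp]
    simp only [List.isEmpty_eq_false_iff.mpr hne, Bool.not_false, Bool.true_eq_false, false_or]
    set t := List.takeWhile (fun x => decide (x ≠ ' ')) cs with ht
    set r := (List.dropWhile (fun x => decide (x ≠ ' ')) cs).tail with hr
    have hq : (match scanA ',' r with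
                | none => (r, ([] : List Char))
                | some p => p) =
        (r.takeWhile (· ≠ ','), (r.dropWhile (· ≠ ',')).tail) := by
      by_cases hc : ',' ∈ r
      · rw [scanA_of_mem hc]
      · rw [scanA_of_not_mem hc]
        have hdw : r.dropWhile (· ≠ ',') = [] := by
          rw [List.dropWhile_eq_nil_iff]
          intro x hx
          simp only [decide_eq_true_eq]
          exact fun h => hc (h ▸ hx)
        have htw : r.takeWhile (· ≠ ',') = r := by
          have h2 := List.takeWhile_append_dropWhile (p := fun x => decide (x ≠ ',')) (l := r)
          rw [hdw, List.append_nil] at h2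
          exact h2
        rw [hdw, htw]
        rfl
    rw [hq]
    by_cases hLD : t = ['L','D']
    · simp only [hLD, ne_eq, not_true_eq_false, false_and, if_false, if_true]
      exact ld_eq _ _
    by_cases hLN : t = ['L','N']
    · simp only [hLN, ne_eq, not_true_eq_false, and_false, if_false, reduceIte]
      apply ln_eq
      intro hs
      rcases reg_cases (PySem.Chars.strip (r.takeWhile (· ≠ ','))) with h|h|h|h|h|h|h|⟨-, hb⟩
      all_goals first
        | (rw [hb] at hs; simp at hs)
        | (have hop : lnOperandPre cs = some (PySem.Chars.strip ((r.dropWhile (· ≠ ',')).tail)) := by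
             unfold lnOperandPre
             rw [if_pos ⟨hsp, ht ▸ hLN⟩, ← hr, if_pos (by rw [h]; tauto)]
           rw [hop] at hpre
           simpa using hpre)
    · simp [hLD, hLN]

  · have hd : cs.dropWhile (· ≠ ' ') = [] := by
      rw [List.dropWhile_eq_nil_iff]
      intro x hx
      simp only [decide_eq_true_eq]
      exact fun h => hsp (h ▸ hx)
    by_cases hLD : cs = ['L','D']
    · subst hLD; decide
    by_cases hLN : cs = ['L','N']
    · subst hLN; decide
    unfold solutionCore solutionAltCore partitionB
    rw [scanA_of_not_mem hsp]
    simp only [List.isEmpty_iff.mpr hd]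
    simp [hLD, hLN]

-- ===== VERDICT (by name: the statement is the Claim_ definition above) =====
theorem solution_spec : Claim_equal_solution := by
  intro param0 _ hpre
  unfold Spec_solution solution solution_alt
  exact congrArg String.ofList (core_eq param0.toList hpre)
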